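-- pv_equiv track=rewrite | github.com/m6r-ai/humbug | src/humbug/syntax/lexer.py | build_operator_map
-- ===== SOURCE A (Python) =====
-- from typing import List, Callable, Optional, Set, ClassVar
--
-- def build_operator_map(operators: List[str]) -> dict:
--     """
--     Build an operator map from a list of operators.
--
--     Args:
--         operators: List of operator strings
--
--     Returns:
--         A dictionary mapping first characters to lists of operators
--         starting with that character, sorted by length (longest first)
--     """
--     operator_map = {}
--     for op in operators:
--         if not op:
--             continue
--
--         first_char = op[0]
--         if first_char not in operator_map:
--             operator_map[first_char] = []
--
--         operator_map[first_char].append(op)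
--
--     # Sort each list by length, longest first to ensure greedy matching
--     for first_char in operator_map:
--         operator_map[first_char].sort(key=len, reverse=True)
--
--     return operator_map
-- ===== SOURCE B (Python) =====
-- def build_operator_map(operators):
--     """One stable global sort (longest first) replaces per-bucket sorting:
--     pre-declare buckets in first-appearance order, then append in sorted order."""
--     operator_map = {op[0]: [] for op in operators if op}
--     for op in sorted((op for op in operators if op), key=len, reverse=True):
--         operator_map[op[0]].append(op)
--     return operator_map
-- ===== Notes on version B (the rewrite author's own statement) =====
-- stated objective: alternative
-- what changed: Instead of grouping first and then sorting each bucket separately, B pre-declares the buckets in first-appearance order and fills them in one pass over a single stable global sort of all operators (longest first), so no per-bucket sorting is needed.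
import Mathlib
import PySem

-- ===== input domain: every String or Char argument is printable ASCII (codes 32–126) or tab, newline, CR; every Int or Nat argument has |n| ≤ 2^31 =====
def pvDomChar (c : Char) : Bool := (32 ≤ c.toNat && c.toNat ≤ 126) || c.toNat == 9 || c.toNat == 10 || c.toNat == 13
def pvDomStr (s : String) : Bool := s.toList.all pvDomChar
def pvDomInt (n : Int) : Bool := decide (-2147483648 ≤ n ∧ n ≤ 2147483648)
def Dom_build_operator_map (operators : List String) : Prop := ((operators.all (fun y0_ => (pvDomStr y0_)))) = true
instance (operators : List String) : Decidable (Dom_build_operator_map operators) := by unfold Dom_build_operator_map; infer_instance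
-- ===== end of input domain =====

-- B replaces A's per-bucket sorts by one stable global length sort feeding the buckets in order (alternative decomposition, same cost).

-- ===== PORT A =====
-- Port of A: group by first character (op[0] ported as the one-character string), then sort
-- each bucket by length, longest first. The dict is PySem.Dict; the final per-key in-place
-- sort loop is the items list with each value sorted.
def build_operator_map (operators : List String) : List (String × List String) :=
  let operator_map : PySem.Dict String (List String) :=
    operators.foldl (fun operator_map op =>
      match op.toList with
      | [] => operator_map                         -- if not op: continue
      | c :: _ =>
        let first_char := String.mk [c]            -- op[0]
        let operator_map :=
          if operator_map.contains first_char then operator_map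
          else operator_map.insert first_char []   -- operator_map[first_char] = []
        operator_map.insert first_char
          (operator_map.getD first_char [] ++ [op]))  -- .append(op)
      PySem.Dict.empty
  -- for first_char in operator_map: operator_map[first_char].sort(key=len, reverse=True)
  operator_map.items.map (fun p => (p.1, PySem.List.sorted p.2 (fun s => PySem.Str.len s) true))

-- ===== PORT B =====
-- Port of B: dict comprehension declaring every bucket empty (insertion order = first
-- appearance), one stable global sort longest-first, then one filling pass.
-- buckets[op[0]].append(op) is ported as Dict.modify with default [] (the key is always present).
def build_operator_map_alt (operators : List String) : List (String × List String) :=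
  let operator_map : PySem.Dict String (List String) :=
    operators.foldl (fun d op =>
      match op.toList with
      | [] => d
      | c :: _ => d.insert (String.mk [c]) []) PySem.Dict.empty
  let ordered := PySem.List.sorted (operators.filter (fun op => !op.toList.isEmpty))
                   (fun s => PySem.Str.len s) true
  let filled := ordered.foldl (fun d op =>
      match op.toList with
      | [] => d
      | c :: _ => d.modify (String.mk [c]) [] (fun l => l ++ [op])) operator_map
  filled.items

-- ===== PRECONDITION & SPEC =====
def Spec_build_operator_map (operators : List String) (out : List (String × List String)) : Prop := out = build_operator_map_alt operators
instance (operators : List String) (out : List (String × List String)) : Decidable (Spec_build_operator_map operators out) := by unfold Spec_build_operator_map; infer_instance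

-- ===== CLAIM (what is proved, stated in full; the proofs are below) =====
def Claim_equal_build_operator_map : Prop := ∀ (operators : List String), Dom_build_operator_map operators → Spec_build_operator_map operators (build_operator_map operators)

-- ===== LEMMAS AND PROOFS =====

-- first character of a (nonempty) operator, as the one-character string Python's op[0] yields
def pvKey1 (op : String) : String := String.mk (op.toList.take 1)

def pvNonempty (op : String) : Bool := !op.toList.isEmpty

-- the common grouping step both folds reduce to
def pvGStep (d : PySem.Dict String (List String)) (op : String) : PySem.Dict String (List String) :=
  d.modify (pvKey1 op) [] (fun l => l ++ [op])

theorem pvFoldA_eq (l : List String) (d : PySem.Dict String (List String)) :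
    l.foldl (fun operator_map op =>
      match op.toList with
      | [] => operator_map
      | c :: _ =>
        let first_char := String.mk [c]
        let operator_map :=
          if operator_map.contains first_char then operator_map
          else operator_map.insert first_char []
        operator_map.insert first_char
          (operator_map.getD first_char [] ++ [op])) d
    = (l.filter pvNonempty).foldl pvGStep d := by
  induction l generalizing d with
  | nil => rfl
  | cons op t ih =>
    cases h : op.toList with
    | nil =>
      simp [List.filter_cons, pvNonempty, h, ih]
    | cons c rest =>
      have hk : pvKey1 op = String.mk [c] := by simp [pvKey1, h]
      have hstep :
          (if d.contains (String.mk [c]) = true then d else d.insert (String.mk [c]) []).insert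
            (String.mk [c])
            ((if d.contains (String.mk [c]) = true then d
              else d.insert (String.mk [c]) []).getD (String.mk [c]) [] ++ [op])
          = pvGStep d op := by
        simp only [pvGStep, hk, PySem.Dict.modify]
        by_cases hc : d.contains (String.mk [c]) = true
        · simp [hc]
        · simp only [Bool.not_eq_true] at hc
          simp [hc, PySem.Dict.getD_insert_self, PySem.Dict.insert_insert_self,
            PySem.Dict.getD_of_not_contains d [] hc]
      simp only [List.foldl_cons, h, hstep]
      simp [pvNonempty, h, ih]

theorem pvFoldInit_eq (l : List String) (d : PySem.Dict String (List String)) :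
    l.foldl (fun d op =>
      match op.toList with
      | [] => d
      | c :: _ => d.insert (String.mk [c]) []) d
    = (l.filter pvNonempty).foldl (fun d op => d.insert (pvKey1 op) []) d := by
  induction l generalizing d with
  | nil => rfl
  | cons op t ih =>
    cases h : op.toList with
    | nil => simp [List.filter_cons, pvNonempty, h, ih]
    | cons c rest =>
      have hk : pvKey1 op = String.mk [c] := by simp [pvKey1, h]
      simp [List.filter_cons, pvNonempty, h, ih, hk]

theorem pvFoldFill_eq (l : List String) (d : PySem.Dict String (List String))
    (hl : ∀ op ∈ l, pvNonempty op = true) :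
    l.foldl (fun d op =>
      match op.toList with
      | [] => d
      | c :: _ => d.modify (String.mk [c]) [] (fun l => l ++ [op])) d
    = l.foldl pvGStep d := by
  induction l generalizing d with
  | nil => rfl
  | cons op t ih =>
    have hop := hl op (by simp)
    cases h : op.toList with
    | nil => simp [pvNonempty, h] at hop
    | cons c rest =>
      have hk : pvKey1 op = String.mk [c] := by simp [pvKey1, h]
      simp only [List.foldl_cons, h, pvGStep, hk]
      exact ih _ (fun x hx => hl x (by simp [hx]))

-- every bucket of the comprehension dict is []
theorem pvInitGetD (l : List String) (d : PySem.Dict String (List String))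
    (hd : ∀ j, d.getD j [] = []) (k : String) :
    (l.foldl (fun d op => d.insert (pvKey1 op) []) d).getD k [] = [] := by
  induction l generalizing d with
  | nil => exact hd k
  | cons op t ih =>
    refine ih _ (fun j => ?_)
    rw [PySem.Dict.getD_insert]
    split <;> simp [hd]

-- a Set.update by elements already present is the identity
theorem pvSetUpdate_subset (s : PySem.Set String) (xs : List String)
    (h : ∀ x ∈ xs, x ∈ s) : PySem.Set.update s xs = s := by
  rw [PySem.Set.update_eq_append_filter]
  have hnil : List.filter (fun y => !s.contains y) (PySem.Set.ofList xs) = [] := by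
    rw [List.filter_eq_nil_iff]
    intro y hy
    have hyx : y ∈ xs := (PySem.Set.mem_ofList xs y).1 hy
    simpa using h y hyx
  rw [hnil, List.append_nil]

-- ---- stable reverse sort commutes with filter ----

theorem pvInsertBy_all {α : Type} (b : α → α → Bool) (x : α) (m : List α)
    (h : ∀ z ∈ m, b x z = true) : PySem.List.insertBy b x m = x :: m := by
  cases m with
  | nil => rfl
  | cons z t => simp [PySem.List.insertBy, h z (by simp)]

theorem pvFilter_insertBy_neg {α : Type} (b : α → α → Bool) (p : α → Bool) (x : α)
    (hx : p x = false) (ys : List α) :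
    (PySem.List.insertBy b x ys).filter p = ys.filter p := by
  induction ys with
  | nil => simp [PySem.List.insertBy, hx]
  | cons y t ih =>
    by_cases hb : b x y = true
    · simp [PySem.List.insertBy, hb, hx]
    · simp only [Bool.not_eq_true] at hb
      by_cases hp : p y = true <;>
        simp [PySem.List.insertBy, hb, List.filter_cons, hp, ih]

theorem pvFilter_insertBy_pos {α : Type} (key : α → Int) (p : α → Bool) (x : α)
    (hx : p x = true) (ys : List α)
    (hs : ys.Pairwise (fun a c => key c ≤ key a)) :
    (PySem.List.insertBy (fun a c => decide (key c < key a)) x ys).filter p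
      = PySem.List.insertBy (fun a c => decide (key c < key a)) x (ys.filter p) := by
  induction ys with
  | nil => simp [PySem.List.insertBy, hx]
  | cons y t ih =>
    rcases List.pairwise_cons.1 hs with ⟨hy, ht⟩
    by_cases hb : key y < key x
    · have hfront : ∀ z ∈ (y :: t).filter p, (fun a c => decide (key c < key a)) x z = true := by
        intro z hz
        have hz' := List.mem_of_mem_filter hz
        rcases List.mem_cons.1 hz' with rfl | hzt
        · simpa using hb
        · have := hy z hzt
          simp only [decide_eq_true_eq]
          omega
      rw [pvInsertBy_all (fun a c => decide (key c < key a)) x ((y :: t).filter p) hfront]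
      simp [PySem.List.insertBy, hb, List.filter_cons, hx]
    · have hb' : (decide (key y < key x)) = false := by simpa using hb
      by_cases hp : p y = true
      · simp [PySem.List.insertBy, hb', List.filter_cons, hp, ih ht]
      · simp only [Bool.not_eq_true] at hp
        simp [PySem.List.insertBy, hb', List.filter_cons, hp, ih ht]

theorem pvSortedRev_filter {α : Type} (key : α → Int) (p : α → Bool) (l : List α) :
    PySem.List.sorted (l.filter p) key true = (PySem.List.sorted l key true).filter p := by
  induction l using List.reverseRecOn with
  | nil => rfl
  | append_singleton l x ih =>
    by_cases hx : p x = true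
    · have hfl : (l ++ [x]).filter p = l.filter p ++ [x] := by simp [List.filter_append, hx]
      rw [hfl, PySem.List.sorted_rev_eq_foldl_insertBy (l.filter p ++ [x]) key,
        PySem.List.sorted_rev_eq_foldl_insertBy (l ++ [x]) key,
        List.foldl_append, List.foldl_append,
        ← PySem.List.sorted_rev_eq_foldl_insertBy (l.filter p) key,
        ← PySem.List.sorted_rev_eq_foldl_insertBy l key]
      simp only [List.foldl_cons, List.foldl_nil]
      rw [ih, pvFilter_insertBy_pos key p x hx _ (PySem.List.sorted_pairwise_rev l key)]
    · simp only [Bool.not_eq_true] at hx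
      have hfl : (l ++ [x]).filter p = l.filter p := by simp [List.filter_append, hx]
      rw [hfl, ih, PySem.List.sorted_rev_eq_foldl_insertBy (l ++ [x]) key, List.foldl_append,
        ← PySem.List.sorted_rev_eq_foldl_insertBy l key]
      simp only [List.foldl_cons, List.foldl_nil]
      rw [pvFilter_insertBy_neg _ p x hx]

-- ---- main equivalence ----

theorem pvMain (operators : List String) :
    build_operator_map operators = build_operator_map_alt operators := by
  have hA : build_operator_map operators
      = ((operators.filter pvNonempty).foldl pvGStep PySem.Dict.empty).items.map
          (fun p => (p.1, PySem.List.sorted p.2 (fun s => PySem.Str.len s) true)) :=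
    congrArg
      (fun d : PySem.Dict String (List String) =>
        d.items.map (fun p : String × List String =>
          (p.1, PySem.List.sorted p.2 (fun s => PySem.Str.len s) true)))
      (pvFoldA_eq operators PySem.Dict.empty)
  have hB : build_operator_map_alt operators
      = ((PySem.List.sorted (operators.filter pvNonempty) (fun s => PySem.Str.len s) true).foldl
          pvGStep
          ((operators.filter pvNonempty).foldl (fun d op => d.insert (pvKey1 op) [])
            PySem.Dict.empty)).items := by
    have h2 := pvFoldFill_eq
      (PySem.List.sorted (operators.filter pvNonempty) (fun s => PySem.Str.len s) true)
      ((operators.filter pvNonempty).foldl (fun d op => d.insert (pvKey1 op) [])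
        PySem.Dict.empty)
      (fun op hop => (List.mem_filter.1 ((PySem.List.mem_sorted _ _ _ _).1 hop)).2)
    calc build_operator_map_alt operators
        = ((PySem.List.sorted (operators.filter pvNonempty) (fun s => PySem.Str.len s) true).foldl
            (fun d op =>
              match op.toList with
              | [] => d
              | c :: _ => d.modify (String.mk [c]) [] (fun l => l ++ [op]))
            ((operators.filter pvNonempty).foldl (fun d op => d.insert (pvKey1 op) [])
              PySem.Dict.empty)).items :=
          congrArg
            (fun d : PySem.Dict String (List String) =>
              ((PySem.List.sorted (operators.filter pvNonempty) (fun s => PySem.Str.len s) true).foldl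
                (fun (d : PySem.Dict String (List String)) (op : String) =>
                  match op.toList with
                  | [] => d
                  | c :: _ => d.modify (String.mk [c]) [] (fun l => l ++ [op])) d).items)
            (pvFoldInit_eq operators PySem.Dict.empty)
      _ = _ := congrArg PySem.Dict.items h2
  rw [hA, hB]
  set m := operators.filter pvNonempty with hm
  set dA := m.foldl pvGStep PySem.Dict.empty with hdA
  set dInit := m.foldl (fun d op => d.insert (pvKey1 op) []) PySem.Dict.empty with hdInit
  set srt := PySem.List.sorted m (fun s => PySem.Str.len s) true with hsrt
  set dB := srt.foldl pvGStep dInit with hdB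
  -- keys
  have hkA : dA.keys = PySem.Set.ofList (m.map pvKey1) := by
    rw [hdA]
    have := PySem.Dict.keys_foldl_modify_key m pvKey1 ([] : List String)
      (fun _ op => fun l => l ++ [op]) PySem.Dict.empty
    simpa [pvGStep, PySem.Set.update_nil_left] using this
  have hkInit : dInit.keys = PySem.Set.ofList (m.map pvKey1) := by
    rw [hdInit]
    have := PySem.Dict.keys_foldl_insert_key m pvKey1
      (fun _ _ => ([] : List String)) PySem.Dict.empty
    simpa [PySem.Set.update_nil_left] using this
  have hkB : dB.keys = PySem.Set.ofList (m.map pvKey1) := by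
    have h1 : (srt.foldl pvGStep dInit).keys = PySem.Set.update dInit.keys (srt.map pvKey1) := by
      have := PySem.Dict.keys_foldl_modify_key srt pvKey1 ([] : List String)
        (fun _ op => fun l => l ++ [op]) dInit
      simpa [pvGStep] using this
    rw [hdB, h1, hkInit]
    refine pvSetUpdate_subset _ _ (fun x hx => ?_)
    rcases List.mem_map.1 hx with ⟨op, hop, rfl⟩
    have : op ∈ m := (PySem.List.mem_sorted _ _ _ _).1 (hsrt ▸ hop)
    exact (PySem.Set.mem_ofList _ _).2 (List.mem_map_of_mem this)
  have hnA : dA.keys.Nodup := by rw [hkA]; exact PySem.Set.nodup_ofList _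
  have hnB : dB.keys.Nodup := by rw [hkB]; exact PySem.Set.nodup_ofList _
  -- values
  have hvA : ∀ k, dA.getD k [] = m.filter (fun op => pvKey1 op == k) := by
    intro k
    rw [hdA]
    have hfm : m.foldl pvGStep PySem.Dict.empty
        = (m.map (fun op => (pvKey1 op, op))).foldl
            (fun d p => d.modify p.1 [] (fun l => l ++ [p.2])) PySem.Dict.empty := by
      rw [List.foldl_map]; rfl
    rw [hfm, PySem.Dict.getD_foldl_modify_append]
    simp [List.filter_map, List.map_map, Function.comp_def, PySem.Dict.getD_empty]
  have hvB : ∀ k, dB.getD k [] = srt.filter (fun op => pvKey1 op == k) := by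
    intro k
    rw [hdB]
    have hfm : srt.foldl pvGStep dInit
        = (srt.map (fun op => (pvKey1 op, op))).foldl
            (fun d p => d.modify p.1 [] (fun l => l ++ [p.2])) dInit := by
      rw [List.foldl_map]; rfl
    rw [hfm, PySem.Dict.getD_foldl_modify_append]
    have : dInit.getD k [] = [] := by
      rw [hdInit]; exact pvInitGetD m PySem.Dict.empty (fun j => PySem.Dict.getD_empty _ _) k
    rw [this]
    simp [List.filter_map, List.map_map, Function.comp_def]
  -- items
  rw [PySem.Dict.items_eq_map_keys dA hnA [], PySem.Dict.items_eq_map_keys dB hnB [],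
    hkA, hkB, List.map_map]
  refine List.map_congr_left (fun k _ => ?_)
  simp only [Function.comp_def, hvA, hvB, Prod.mk.injEq, true_and]
  rw [hsrt, ← pvSortedRev_filter]

-- ===== VERDICT (by name: the statement is the Claim_ definition above) =====
theorem build_operator_map_spec : Claim_equal_build_operator_map := by
  intro operators _
  unfold Spec_build_operator_map
  exact pvMain operators
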